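-- pv_equiv track=rewrite | github.com/segnig/CodeForces | A2SV Contest Round #4/C_Binary_Flip.py | solve
-- ===== SOURCE A (Python) =====
-- def solve(a, b):
--     count_1 = count_0 = 0
--     left = 0
--
--     for right in range(len(a)):
--         count_1 += a[right] == "1"
--         count_0 += a[right] == "0"
--
--         if count_0 == count_1:
--             is_all_same = all(a[i] == b[i] for i in range(left, right + 1))
--             is_all_diff = all(a[i] != b[i] for i in range(left, right + 1))
--             if not (is_all_same or is_all_diff):
--                 return False
--             left = right + 1
--
--     is_all_same = all(a[i] == b[i] for i in range(left, len(a)))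
--     is_all_diff = all(a[i] != b[i] for i in range(left, len(a)))
--     if not (is_all_same or is_all_diff):
--         return False
--     return True
-- ===== SOURCE B (Python) =====
-- def solve(a, b):
--     count_1 = count_0 = 0
--     same_ok = diff_ok = True
--     for i in range(len(a)):
--         count_1 += a[i] == "1"
--         count_0 += a[i] == "0"
--         same_ok = same_ok and a[i] == b[i]
--         diff_ok = diff_ok and a[i] != b[i]
--         if count_0 == count_1:
--             if not (same_ok or diff_ok):
--                 return False
--             same_ok = diff_ok = True
--     return same_ok or diff_ok
-- ===== Notes on version B (the rewrite author's own statement) =====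
-- stated objective: simpler
-- what changed: B replaces A's two inner all() rescans of each balanced segment by two running booleans (same_ok/diff_ok) maintained in the single left-to-right pass and reset when a segment closes, turning the O(n^2)-worst-case two-level scan into one O(n) pass.
-- outside the precondition, e.g. on solve('0011', '01'): A returns False, B returns False
import Mathlib
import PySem

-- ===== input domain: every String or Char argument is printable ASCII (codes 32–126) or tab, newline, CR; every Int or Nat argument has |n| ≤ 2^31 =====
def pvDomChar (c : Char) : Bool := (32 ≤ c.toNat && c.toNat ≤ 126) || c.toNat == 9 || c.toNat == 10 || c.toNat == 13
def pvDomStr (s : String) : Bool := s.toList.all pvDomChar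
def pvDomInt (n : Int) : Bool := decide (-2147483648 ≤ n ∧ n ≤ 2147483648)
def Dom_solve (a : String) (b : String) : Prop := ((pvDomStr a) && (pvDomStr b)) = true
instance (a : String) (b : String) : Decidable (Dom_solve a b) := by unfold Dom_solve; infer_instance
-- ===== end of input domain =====

-- B replaces A's two inner all() rescans of each balanced segment by running same_ok/diff_ok
-- booleans in a single pass (objective: simpler/faster by removing the inner scans).

-- ===== PORT A =====
-- all(a[i] == b[i] for i in range(lo, hi))  (indices in range under Pre_, so getD is exact)
def allEq (la lb : List Char) (lo hi : Nat) : Bool :=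
  (List.range' lo (hi - lo)).all (fun i => la.getD i ' ' == lb.getD i ' ')

-- all(a[i] != b[i] for i in range(lo, hi))
def allNe (la lb : List Char) (lo hi : Nat) : Bool :=
  (List.range' lo (hi - lo)).all (fun i => la.getD i ' ' != lb.getD i ' ')

-- the for-loop of A over the remaining values of `right`, state (count_1, count_0, left)
def loopA (la lb : List Char) : List Nat → Nat → Nat → Nat → Bool
  | [], _, _, left =>
      -- trailing-segment check and final `return True`
      (allEq la lb left la.length || allNe la lb left la.length)
  | r :: rs, c1, c0, left =>
      let c1 := c1 + (if la.getD r ' ' = '1' then 1 else 0)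
      let c0 := c0 + (if la.getD r ' ' = '0' then 1 else 0)
      if c0 = c1 then
        if !(allEq la lb left (r + 1) || allNe la lb left (r + 1)) then false
        else loopA la lb rs c1 c0 (r + 1)
      else loopA la lb rs c1 c0 left

def solve (a : String) (b : String) : Bool :=
  loopA a.toList b.toList (List.range a.toList.length) 0 0 0

-- ===== PORT B =====
-- the for-loop of B, state (count_1, count_0, same_ok, diff_ok)
def loopB (la lb : List Char) : List Nat → Nat → Nat → Bool → Bool → Bool
  | [], _, _, sOk, dOk => sOk || dOk
  | i :: rest, c1, c0, sOk, dOk =>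
      let c1 := c1 + (if la.getD i ' ' = '1' then 1 else 0)
      let c0 := c0 + (if la.getD i ' ' = '0' then 1 else 0)
      let sOk := sOk && (la.getD i ' ' == lb.getD i ' ')
      let dOk := dOk && (la.getD i ' ' != lb.getD i ' ')
      if c0 = c1 then
        if !(sOk || dOk) then false
        else loopB la lb rest c1 c0 true true
      else loopB la lb rest c1 c0 sOk dOk

def solve_alt (a : String) (b : String) : Bool :=
  loopB a.toList b.toList (List.range a.toList.length) 0 0 true true

-- ===== PRECONDITION & SPEC =====
-- Pre_ excludes pairs with b shorter than a: there the Python A reads b past its end and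
-- usually raises IndexError (on a few such pairs short-circuiting lets A return False first,
-- and B returns the same value there; see the cite).
def Pre_solve (a : String) (b : String) : Prop := a.toList.length ≤ b.toList.length
instance (a : String) (b : String) : Decidable (Pre_solve a b) := by unfold Pre_solve; infer_instance
def pvWitness_solve : String × String := ("0110", "0101")

def Spec_solve (a : String) (b : String) (out : Bool) : Prop := out = solve_alt a b
instance (a : String) (b : String) (out : Bool) : Decidable (Spec_solve a b out) := by unfold Spec_solve; infer_instance

-- ===== CLAIM (what is proved, stated in full; the proofs are below) =====
def Claim_equal_solve : Prop := ∀ (a : String) (b : String), Dom_solve a b → Pre_solve a b → Spec_solve a b (solve a b)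

-- ===== LEMMAS AND PROOFS =====

theorem allEq_self (la lb : List Char) (lo : Nat) : allEq la lb lo lo = true := by
  simp [allEq]

theorem allNe_self (la lb : List Char) (lo : Nat) : allNe la lb lo lo = true := by
  simp [allNe]

theorem allEq_succ (la lb : List Char) (lo r : Nat) (h : lo ≤ r) :
    allEq la lb lo (r + 1) = (allEq la lb lo r && (la.getD r ' ' == lb.getD r ' ')) := by
  unfold allEq
  have h1 : r + 1 - lo = (r - lo) + 1 := by omega
  have h2 : lo + (r - lo) = r := by omega
  rw [h1, List.range'_1_concat, List.all_append, h2]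
  simp

theorem allNe_succ (la lb : List Char) (lo r : Nat) (h : lo ≤ r) :
    allNe la lb lo (r + 1) = (allNe la lb lo r && (la.getD r ' ' != lb.getD r ' ')) := by
  unfold allNe
  have h1 : r + 1 - lo = (r - lo) + 1 := by omega
  have h2 : lo + (r - lo) = r := by omega
  rw [h1, List.range'_1_concat, List.all_append, h2]
  simp

theorem loop_eq (la lb : List Char) :
    ∀ (k r c1 c0 left : Nat), left ≤ r → r + k = la.length →
    loopA la lb (List.range' r k) c1 c0 left
      = loopB la lb (List.range' r k) c1 c0 (allEq la lb left r) (allNe la lb left r) := by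
  intro k
  induction k with
  | zero =>
      intro r c1 c0 left _ hlen
      simp [List.range', loopA, loopB, ← hlen]
  | succ k ih =>
      intro r c1 c0 left hle hlen
      rw [List.range'_succ]
      simp only [loopA, loopB]
      rw [← allEq_succ la lb left r hle, ← allNe_succ la lb left r hle]
      generalize (c1 + (if la.getD r ' ' = '1' then 1 else 0)) = c1'
      generalize (c0 + (if la.getD r ' ' = '0' then 1 else 0)) = c0'
      by_cases hc : c0' = c1'
      · simp only [if_pos hc]
        by_cases hbad : (!(allEq la lb left (r + 1) || allNe la lb left (r + 1))) = true
        · simp only [if_pos hbad]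
        · simp only [if_neg hbad]
          rw [ih (r + 1) c1' c0' (r + 1) (Nat.le_refl _) (by omega),
              allEq_self, allNe_self]
      · simp only [if_neg hc]
        exact ih (r + 1) c1' c0' left (by omega) (by omega)

-- ===== VERDICT (by name: the statement is the Claim_ definition above) =====
theorem solve_spec : Claim_equal_solve := by
  intro a b _ _
  unfold Spec_solve solve solve_alt
  rw [List.range_eq_range']
  rw [loop_eq a.toList b.toList a.toList.length 0 0 0 0 (Nat.le_refl 0) (by omega),
      allEq_self, allNe_self]
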